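-- pv_equiv track=rewrite | github.com/SeolJaeHyeok/TIL | Algorithm/WTC/GCT/2.py | solution
-- ===== SOURCE A (Python) =====
-- def solution(p):
--     answer = 0
--     for i in range(len(p)):
--         # 왼쪽 및 오른쪽 화살표 체크
--         left_check = right_check = True
--         if p[i] == '<':  # 왼쪽 화살표인 경우
--             # 해당 시작점부터 앞으로 탐색
--             for j in range(i, -1, -1):
--                 # 오른쪽 화살표를 만난경우 체크
--                 if p[j] == '>':
--                     right_check = False
--                     break
--         else:  # 오른쪽 화살표인 경우
--             # 해당 시작점부터 뒤로 탐색
--             for j in range(i, len(p)):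
--                 # 왼쪽 화살표를 만난 경우 체크
--                 if p[j] == '<':
--                     left_check = False
--                     break
--
--         # 반대되는 화살표를 만난 적이 없을 경우 카운팅
--         if left_check and right_check:
--             answer += 1
--
--     return answer
-- ===== SOURCE B (Python) =====
-- def solution(p):
--     # '<' survives iff no '>' at or before it; any other char survives iff no '<' at or after it.
--     pre = 0
--     for c in p:
--         if c == '>':
--             break
--         if c == '<':
--             pre += 1
--     suf = 0
--     for c in reversed(p):
--         if c == '<':
--             break
--         suf += 1
--     return pre + suf
-- ===== Notes on version B (the rewrite author's own statement) =====
-- stated objective: faster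
-- what changed: Replaced A's per-index backward/forward rescans with two single scans: count '<' until the first '>', plus the length of the trailing run containing no '<'.
import Mathlib
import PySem

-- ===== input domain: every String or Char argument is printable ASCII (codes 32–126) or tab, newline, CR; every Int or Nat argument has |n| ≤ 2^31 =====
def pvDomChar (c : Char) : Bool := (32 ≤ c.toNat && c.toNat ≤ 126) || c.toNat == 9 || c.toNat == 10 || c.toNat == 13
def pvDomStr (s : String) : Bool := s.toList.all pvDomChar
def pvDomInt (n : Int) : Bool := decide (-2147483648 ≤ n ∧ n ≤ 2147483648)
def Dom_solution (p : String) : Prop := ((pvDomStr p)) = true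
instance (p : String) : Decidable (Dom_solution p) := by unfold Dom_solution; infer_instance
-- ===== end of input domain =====

-- B replaces A's per-index backward/forward rescans by two single scans (prefix '<'s before the
-- first '>' plus the trailing run without '<'); objective: faster (O(n) instead of O(n^2)).

-- ===== PORT A =====
-- inner loop 'for j in range(i, -1, -1): if p[j]=='>': right_check=False; break'
-- (index j is always in range, so p[j] is exactly List.getD)
def innerLeftA (l : List Char) : Nat → Bool
  | 0 => if l.getD 0 ' ' = '>' then false else true
  | j + 1 => if l.getD (j + 1) ' ' = '>' then false else innerLeftA l j

-- inner loop 'for j in range(i, len(p)): if p[j]=='<': left_check=False; break'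
def innerRightA (l : List Char) (j : Nat) : Bool :=
  if _h : j < l.length then
    if l.getD j ' ' = '<' then false else innerRightA l (j + 1)
  else true
termination_by l.length - j

def solution (p : String) : Int :=
  let l := p.toList
  (List.range l.length).foldl (fun answer i =>
    let lr : Bool × Bool :=
      if l.getD i ' ' = '<' then (true, innerLeftA l i)
      else (innerRightA l i, true)
    if lr.1 && lr.2 then answer + 1 else answer) 0

-- ===== PORT B =====
-- first scan: count '<' until the first '>'
def altPre : List Char → Int
  | [] => 0
  | c :: cs => if c = '>' then 0 else (if c = '<' then 1 else 0) + altPre cs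

-- second scan (over the reversed string): count until a '<' is met
def altSuf : List Char → Int
  | [] => 0
  | c :: cs => if c = '<' then 0 else 1 + altSuf cs

def solution_alt (p : String) : Int := altPre p.toList + altSuf p.toList.reverse

-- ===== PRECONDITION & SPEC =====
def Spec_solution (p : String) (out : Int) : Prop := out = solution_alt p
instance (p : String) (out : Int) : Decidable (Spec_solution p out) := by unfold Spec_solution; infer_instance

-- ===== CLAIM (what is proved, stated in full; the proofs are below) =====
def Claim_equal_solution : Prop := ∀ (p : String), Dom_solution p → Spec_solution p (solution p)

-- ===== LEMMAS AND PROOFS =====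

-- the two boolean conditions A's per-index test decomposes into
def condP (l : List Char) (i : Nat) : Bool :=
  (l.getD i ' ' == '<') && decide (∀ k < i + 1, l.getD k ' ' ≠ '>')
def condQ (l : List Char) (i : Nat) : Bool :=
  decide (∀ k, i ≤ k → k < l.length → l.getD k ' ' ≠ '<')
def condA (l : List Char) (i : Nat) : Bool :=
  if l.getD i ' ' = '<' then innerLeftA l i else innerRightA l i

lemma innerRightA_unfold (l : List Char) (j : Nat) :
    innerRightA l j = if j < l.length then
      (if l.getD j ' ' = '<' then false else innerRightA l (j + 1)) else true := by
  rw [innerRightA]; simp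


lemma innerLeftA_iff (l : List Char) (i : Nat) :
    innerLeftA l i = true ↔ ∀ k < i + 1, l.getD k ' ' ≠ '>' := by
  induction i with
  | zero =>
    by_cases h : l.getD 0 ' ' = '>' <;> simp [innerLeftA, h, Nat.lt_one_iff]
  | succ j ih =>
    by_cases h : l.getD (j + 1) ' ' = '>'
    · simp only [innerLeftA, if_pos h, Bool.false_eq_true, false_iff, not_forall, not_not]
      exact ⟨j + 1, by omega, by simpa using h⟩
    · simp only [innerLeftA, if_neg h, ih]
      constructor
      · intro hall k hk
        by_cases hkj : k = j + 1
        · subst hkj; exact h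
        · exact hall k (by omega)
      · intro hall k hk
        exact hall k (by omega)


lemma innerRightA_iff (l : List Char) (i : Nat) :
    innerRightA l i = true ↔ ∀ k, i ≤ k → k < l.length → l.getD k ' ' ≠ '<' := by
  induction i using innerRightA.induct (l := l) with
  | case1 x hx hc =>
    rw [innerRightA_unfold, if_pos hx, if_pos hc]
    simp only [Bool.false_eq_true, false_iff, not_forall, not_not]
    exact ⟨x, le_rfl, hx, by simpa using hc⟩
  | case2 x hx hc ih =>
    rw [innerRightA_unfold, if_pos hx, if_neg hc, ih]
    constructor
    · intro hall k hk hk'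
      by_cases hkx : k = x
      · subst hkx; exact hc
      · exact hall k (by omega) hk'
    · intro hall k hk hk'
      exact hall k (by omega) hk'
  | case3 x hx =>
    rw [innerRightA_unfold, if_neg hx]
    simp only [true_iff]
    intro k hk hk'; omega

lemma innerLeftA_eq (l : List Char) (i : Nat) :
    innerLeftA l i = decide (∀ k < i + 1, l.getD k ' ' ≠ '>') := by
  rw [Bool.eq_iff_iff, innerLeftA_iff, decide_eq_true_iff]

lemma innerRightA_eq (l : List Char) (i : Nat) :
    innerRightA l i = condQ l i := by
  unfold condQ
  rw [Bool.eq_iff_iff, innerRightA_iff, decide_eq_true_iff]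

lemma condA_eq (l : List Char) (i : Nat) (hi : i < l.length) :
    condA l i = (condP l i || condQ l i) := by
  unfold condA condP
  rw [innerLeftA_eq, innerRightA_eq]
  by_cases h : l.getD i ' ' = '<'
  · have hq : condQ l i = false := by
      unfold condQ
      simp only [decide_eq_false_iff_not]
      intro hall; exact hall i le_rfl hi h
    rw [if_pos h, hq, h]
    simp
  · rw [if_neg h, show (l.getD i ' ' == '<') = false from by simpa using h]
    simp

lemma foldl_count (c : Nat → Bool) (xs : List Nat) (a : Int) :
    xs.foldl (fun acc i => if c i then acc + 1 else acc) a = a + (xs.countP c : Int) := by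
  induction xs generalizing a with
  | nil => simp
  | cons x xs ih =>
    simp only [List.foldl_cons, List.countP_cons, ih]
    by_cases h : c x <;> simp [h] <;> push_cast <;> ring

lemma countP_or_disjoint (xs : List Nat) (p q : Nat → Bool)
    (hd : ∀ i ∈ xs, ¬(p i = true ∧ q i = true)) :
    xs.countP (fun i => p i || q i) = xs.countP p + xs.countP q := by
  induction xs with
  | nil => simp
  | cons x xs ih =>
    have hx := hd x (by simp)
    have ih' := ih (fun i hi => hd i (by simp [hi]))
    simp only [List.countP_cons, ih']
    by_cases hp : p x <;> by_cases hq : q x <;> simp [hp, hq] at hx ⊢ <;> omega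

lemma countP_range_succ_shift (n : Nat) (c : Nat → Bool) :
    (List.range (n + 1)).countP c
      = (if c 0 then 1 else 0) + (List.range n).countP (fun i => c (i + 1)) := by
  rw [List.range_succ_eq_map, List.countP_cons, List.countP_map]
  by_cases h : c 0 <;> simp [h, Function.comp_def] <;> omega

-- Nat twins of B's two scans
def natPre : List Char → Nat
  | [] => 0
  | c :: cs => if c = '>' then 0 else (if c = '<' then 1 else 0) + natPre cs

def natSuf : List Char → Nat
  | [] => 0
  | c :: cs => if c = '<' then 0 else 1 + natSuf cs

lemma altPre_eq_nat (l : List Char) : altPre l = (natPre l : Int) := by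
  induction l with
  | nil => simp [altPre, natPre]
  | cons c cs ih =>
    simp only [altPre, natPre, ih]
    by_cases h : c = '>' <;> by_cases h2 : c = '<' <;> simp [h, h2]

lemma altSuf_eq_nat (l : List Char) : altSuf l = (natSuf l : Int) := by
  induction l with
  | nil => simp [altSuf, natSuf]
  | cons c cs ih =>
    simp only [altSuf, natSuf, ih]
    by_cases h : c = '<' <;> simp [h]

lemma countP_condP (l : List Char) :
    (List.range l.length).countP (condP l) = natPre l := by
  induction l with
  | nil => simp [natPre]
  | cons c cs ih =>
    rw [List.length_cons, countP_range_succ_shift]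
    have h0 : condP (c :: cs) 0 = (c == '<') := by
      unfold condP
      rw [List.getD_cons_zero]
      by_cases h : c = '<'
      · subst h
        have hz : ∀ k < 1, ('<' :: cs).getD k ' ' ≠ '>' := by
          intro k hk; interval_cases k; simp
        simp [hz]
      · simp [h]
    by_cases hgt : c = '>'
    · subst hgt
      have hz : ∀ i, condP ('>' :: cs) (i + 1) = false := by
        intro i
        unfold condP
        simp only [Bool.and_eq_false_iff, decide_eq_false_iff_not]
        right; intro hall
        exact hall 0 (by omega) (by simp)
      have hcnt : (List.range cs.length).countP (fun i => condP ('>' :: cs) (i + 1)) = 0 :=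
        List.countP_eq_zero.mpr (fun a _ => by simp [hz a])
      rw [h0, hcnt]
      simp [natPre]
    · have hstep : ∀ i, condP (c :: cs) (i + 1) = condP cs i := by
        intro i
        unfold condP
        rw [List.getD_cons_succ]
        congr 1
        rw [decide_eq_decide]
        constructor
        · intro hall k hk
          simpa using hall (k + 1) (by omega)
        · intro hall k hk
          match k with
          | 0 => simpa using hgt
          | k + 1 => simpa using hall k (by omega)
      rw [h0, List.countP_congr (fun i _ => by rw [hstep i]), ih]
      by_cases h2 : c = '<' <;> simp [natPre, hgt, h2]

lemma natSuf_of_no_lt (l : List Char) (h : '<' ∉ l) : natSuf l = l.length := by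
  induction l with
  | nil => simp [natSuf]
  | cons c cs ih =>
    simp only [List.mem_cons, not_or] at h
    simp [natSuf, Ne.symm h.1, ih h.2, Nat.add_comm]

lemma natSuf_append_singleton (ys : List Char) (c : Char) :
    natSuf (ys ++ [c]) =
      if '<' ∈ ys then natSuf ys else natSuf ys + (if c = '<' then 0 else 1) := by
  induction ys with
  | nil => by_cases h : c = '<' <;> simp [natSuf, h]
  | cons y ys ih =>
    by_cases hy : y = '<'
    · simp [natSuf, hy]
    · by_cases hmem : '<' ∈ ys <;>
        simp [natSuf, hy, ih, hmem, List.mem_cons, Ne.symm hy] <;> omega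

lemma countP_condQ (l : List Char) :
    (List.range l.length).countP (condQ l) = natSuf l.reverse := by
  induction l with
  | nil => simp [natSuf]
  | cons c cs ih =>
    rw [List.length_cons, countP_range_succ_shift]
    have h0 : condQ (c :: cs) 0 = (decide (c ≠ '<') && decide ('<' ∉ cs)) := by
      unfold condQ
      rw [Bool.eq_iff_iff, Bool.and_eq_true, decide_eq_true_iff, decide_eq_true_iff,
          decide_eq_true_iff]
      constructor
      · intro h
        refine ⟨by simpa using h 0 (by omega) (by simp), ?_⟩
        intro hmem
        obtain ⟨k, hk, hkv⟩ := List.mem_iff_getElem.mp hmem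
        exact h (k + 1) (by omega) (by simpa using hk)
          (by rw [List.getD_cons_succ, List.getD_eq_getElem _ _ hk]; exact hkv)
      · rintro ⟨h1, h2⟩ k _ hk'
        match k with
        | 0 => simpa using h1
        | k + 1 =>
          rw [List.getD_cons_succ]
          have hk2 : k < cs.length := by simpa using hk'
          rw [List.getD_eq_getElem _ _ hk2]
          intro hv; exact h2 (hv ▸ cs.getElem_mem hk2)
    have hstep : ∀ i, condQ (c :: cs) (i + 1) = condQ cs i := by
      intro i
      unfold condQ
      rw [decide_eq_decide]
      constructor
      · intro h k hk hk'
        simpa using h (k + 1) (by omega) (by simpa using hk')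
      · intro h k hk hk'
        match k, hk with
        | k + 1, _ =>
          rw [List.getD_cons_succ]
          exact h k (by omega) (by simpa using hk')
    rw [h0, List.countP_congr (fun i _ => by rw [hstep i]), ih, List.reverse_cons,
        natSuf_append_singleton]
    by_cases hmem : '<' ∈ cs
    · simp [hmem]
    · have hrev : '<' ∉ cs.reverse := by simpa using hmem
      rw [natSuf_of_no_lt _ hrev]
      by_cases hc : c = '<' <;> simp [hmem, hc] <;> omega

lemma solution_eq_countP (p : String) :
    solution p = ((List.range p.toList.length).countP (condA p.toList) : Nat) := by
  unfold solution
  rw [List.foldl_ext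
      (g := fun (answer : Int) i => if condA p.toList i then answer + 1 else answer)
      (f := fun answer i =>
        let lr : Bool × Bool :=
          if p.toList.getD i ' ' = '<' then (true, innerLeftA p.toList i)
          else (innerRightA p.toList i, true)
        if lr.1 && lr.2 then answer + 1 else answer)
      (H := by
        intro a i _
        unfold condA
        by_cases h : p.toList.getD i ' ' = '<'
        · simp only [if_pos h]; simp
        · simp only [if_neg h]; simp)]
  rw [foldl_count]
  simp

-- ===== VERDICT (by name: the statement is the Claim_ definition above) =====
theorem solution_spec : Claim_equal_solution := by
  intro p _
  unfold Spec_solution solution_alt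
  rw [solution_eq_countP, altPre_eq_nat, altSuf_eq_nat,
      List.countP_congr (fun i hi => by rw [condA_eq p.toList i (List.mem_range.mp hi)]),
      countP_or_disjoint _ _ _ (by
        intro i hi ⟨hp, hq⟩
        unfold condP at hp
        unfold condQ at hq
        simp only [Bool.and_eq_true, beq_iff_eq, decide_eq_true_iff] at hp hq
        exact hq i le_rfl (List.mem_range.mp hi) hp.1),
      countP_condP, countP_condQ]
  push_cast; ring
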